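-- pv_equiv track=rewrite | github.com/Megatvini/InformationTheory | Assignment2/src/PrefCode.py | generate_code_words
-- ===== SOURCE A (Python) =====
-- def add_bit(word):
--     num = int(word, base=2)
--     res = str(bin(num + 1))[2:]
--     if len(res) > len(word):
--         raise ValueError("Encountered bad word {} when adding bit".format(word))
--     while len(res) < len(word):
--         res = '0' + res
--     return res
--
-- def generate_new_word(word_length, last_used_word):
--     res = ''
--     if last_used_word is not None:
--         res = add_bit(last_used_word)
--     while len(res) < word_length:
--         res += '0'
--     return res
--
-- def generate_code_words(word_lengths):
--     word_lengths = sorted(word_lengths)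
--     res = []
--     last_used_word = None
--     for word_length in word_lengths:
--         new_word = generate_new_word(word_length, last_used_word)
--         res.append(new_word)
--         last_used_word = new_word
--     return res
-- ===== SOURCE B (Python) =====
-- def generate_code_words(word_lengths):
--     lengths = sorted(word_lengths)
--     words = []
--     for i, length in enumerate(lengths):
--         code = sum(1 << (length - l) for l in lengths[:i])
--         if i and code >= 1 << length:
--             raise ValueError("code lengths violate the Kraft inequality")
--         words.append(''.join('1' if code >> (length - 1 - k) & 1 else '0'
--                              for k in range(length)))
--     return words
-- ===== Notes on version B (the rewrite author's own statement) =====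
-- stated objective: alternative
-- what changed: B computes each codeword independently by the closed form code_i = sum of 2^(l_i - l_j) over earlier sorted lengths and reads its bits off directly, instead of A's sequential pass that carries the previous word and increments it as a binary string with padding loops.
import Mathlib
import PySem

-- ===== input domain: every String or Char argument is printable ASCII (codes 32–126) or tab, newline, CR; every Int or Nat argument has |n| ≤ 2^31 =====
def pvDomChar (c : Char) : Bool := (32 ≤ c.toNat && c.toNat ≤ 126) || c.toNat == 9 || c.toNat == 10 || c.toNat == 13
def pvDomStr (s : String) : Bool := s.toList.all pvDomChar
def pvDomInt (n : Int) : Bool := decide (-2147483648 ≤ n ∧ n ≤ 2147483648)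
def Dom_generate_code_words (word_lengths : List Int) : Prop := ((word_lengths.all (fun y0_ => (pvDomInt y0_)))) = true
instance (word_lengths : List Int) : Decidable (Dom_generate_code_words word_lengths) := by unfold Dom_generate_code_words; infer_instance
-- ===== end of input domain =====

-- B computes each codeword independently from a closed-form sum over the earlier sorted
-- lengths and reads its bits off directly, instead of A's stateful string-increment pass
-- (alternative formulation; no speed claim).

-- ===== PORT A =====

-- int(word, base=2): exact on strings of '0'/'1' characters — the only words A ever feeds it;
-- none = ValueError (empty string or a non-binary character).
def pvBinStep (acc : Option Nat) (c : Char) : Option Nat :=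
  acc.bind fun a => if c = '0' then some (2 * a) else if c = '1' then some (2 * a + 1) else none

def pvBinVal? (s : List Char) : Option Nat :=
  if s.isEmpty then none else s.foldl pvBinStep (some 0)

-- binary digit characters of n, most significant first ('' for 0)
def pvDigitsChars (n : Nat) : List Char :=
  ((Nat.digits 2 n).map (fun d => if d = 1 then '1' else '0')).reverse

-- str(bin(n))[2:]
def pvBinChars (n : Nat) : List Char :=
  if n = 0 then ['0'] else pvDigitsChars n

-- the 'while len(res) < len(word): res = '0' + res' loop of add_bit
def pvPadLeft (res : List Char) (target : Nat) : List Char :=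
  if h : res.length < target then pvPadLeft ('0' :: res) target else res
termination_by target - res.length
decreasing_by simp; omega

def add_bit (word : String) : Option String :=
  match pvBinVal? word.toList with
  | none => none                                  -- int('', 2) / bad char: ValueError
  | some num =>
    let res := pvBinChars (num + 1)
    if res.length > word.toList.length then none  -- raise ValueError("Encountered bad word …")
    else some (String.ofList (pvPadLeft res word.toList.length))

-- the 'while len(res) < word_length: res += '0'' loop of generate_new_word
def pvPadRight (res : List Char) (target : Int) : List Char :=
  if h : (res.length : Int) < target then pvPadRight (res ++ ['0']) target else res
termination_by (target - res.length).toNat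
decreasing_by simp; omega

def generate_new_word (word_length : Int) (last_used_word : Option String) : Option String :=
  match last_used_word with
  | none => some (String.ofList (pvPadRight [] word_length))
  | some w => (add_bit w).map fun r => String.ofList (pvPadRight r.toList word_length)

-- the for-loop of generate_code_words; none = the ValueError propagating out
def pvLoopA : List Int → Option String → List String → Option (List String)
  | [], _, acc => some acc
  | L :: rest, last, acc =>
    match generate_new_word L last with
    | none => none
    | some w => pvLoopA rest (some w) (acc ++ [w])

def generate_code_words (word_lengths : List Int) : List String :=
  (pvLoopA (PySem.List.sorted word_lengths (fun x => x) false) none []).getD []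

-- ===== PORT B =====

-- code = sum(1 << (length - l) for l in lengths[:i]); the slice index i from enumerate is >= 0,
-- so lengths[:i] = take i, and length - l >= 0 on the sorted list, so << is a Nat shift
def pvCodeOf (pref : List Int) (L : Int) : Nat :=
  (pref.map (fun l => (1 : Nat) <<< (L - l).toNat)).sum

-- ''.join('1' if code >> (length - 1 - k) & 1 else '0' for k in range(length))
def pvWordOf (code : Nat) (L : Int) : String :=
  String.ofList ((PySem.List.pyRange 0 L 1).map (fun k =>
    if (code >>> (L - 1 - k).toNat) &&& 1 ≠ 0 then '1' else '0'))

-- the for-loop over enumerate(lengths); none = the ValueError propagating out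
-- ('1 << length' raises on a negative length; the explicit raise when code >= 1 << length)
def pvLoopB (lengths : List Int) : List (Int × Int) → List String → Option (List String)
  | [], words => some words
  | iL :: rest, words =>
    let code := pvCodeOf (lengths.take iL.1.toNat) iL.2
    if iL.1 ≠ 0 then
      if iL.2 < 0 then none                      -- 1 << length: negative shift ValueError
      else if 2 ^ iL.2.toNat ≤ code then none    -- raise ValueError (Kraft violated)
      else pvLoopB lengths rest (words ++ [pvWordOf code iL.2])
    else pvLoopB lengths rest (words ++ [pvWordOf code iL.2])

def generate_code_words_alt (word_lengths : List Int) : List String :=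
  (pvLoopB (PySem.List.sorted word_lengths (fun x => x) false)
    (PySem.List.enumerate (PySem.List.sorted word_lengths (fun x => x) false) 0) []).getD []

-- ===== PRECONDITION & SPEC =====

-- Pre_ excludes exactly the inputs on which A raises ValueError: with at least two lengths,
-- either some length ≤ 0 (int('', 2) fails on the empty first word) or the Kraft sum of all
-- but the largest sorted length reaches 1 (the binary increment overflows); the Kraft
-- inequality sum 2^(-l_j) < 1 over the sorted list without its last element is stated
-- multiplied through by 2^max to stay in Int.
def Pre_generate_code_words (word_lengths : List Int) : Prop :=
  word_lengths.length ≤ 1 ∨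
    ((∀ x ∈ word_lengths, 1 ≤ x) ∧
      (((PySem.List.sorted word_lengths (fun x => x) false).dropLast.map
          (fun x => (2 : Int) ^ ((PySem.List.sorted word_lengths (fun x => x) false).getLastD 0 - x).toNat)).sum
        < (2 : Int) ^ (((PySem.List.sorted word_lengths (fun x => x) false).getLastD 0).toNat)))
instance (word_lengths : List Int) : Decidable (Pre_generate_code_words word_lengths) := by
  unfold Pre_generate_code_words; infer_instance

def pvWitness_generate_code_words : List Int := [2, 1, 3]

def Spec_generate_code_words (word_lengths : List Int) (out : List String) : Prop := out = generate_code_words_alt word_lengths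
instance (word_lengths : List Int) (out : List String) : Decidable (Spec_generate_code_words word_lengths out) := by unfold Spec_generate_code_words; infer_instance

-- ===== CLAIM (what is proved, stated in full; the proofs are below) =====
def Claim_equal_generate_code_words : Prop := ∀ (word_lengths : List Int), Dom_generate_code_words word_lengths → Pre_generate_code_words word_lengths → Spec_generate_code_words word_lengths (generate_code_words word_lengths)

-- ===== LEMMAS AND PROOFS =====

-- bit value of a binary digit character (proof-side only)
def pvBitNat (c : Char) : Nat := if c = '1' then 1 else 0

def pvVal (l : List Char) : Nat := l.foldl (fun a c => 2 * a + pvBitNat c) 0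

lemma pvBinStep_fold (l : List Char) (h : ∀ c ∈ l, c = '0' ∨ c = '1') :
    ∀ a : Nat, l.foldl pvBinStep (some a) = some (l.foldl (fun a c => 2 * a + pvBitNat c) a) := by
  induction l with
  | nil => intro a; rfl
  | cons c t ih =>
    intro a
    have hc := h c (by simp)
    have ht : ∀ c ∈ t, c = '0' ∨ c = '1' := fun x hx => h x (by simp [hx])
    rcases hc with hc | hc <;>
      simp [List.foldl_cons, pvBinStep, hc, pvBitNat, ih ht]

lemma pvDigitsChars_bits (n : Nat) : ∀ c ∈ pvDigitsChars n, c = '0' ∨ c = '1' := by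
  intro c hc
  simp only [pvDigitsChars, List.mem_reverse, List.mem_map] at hc
  obtain ⟨d, _, hd⟩ := hc
  by_cases h1 : d = 1 <;> simp [h1] at hd <;> subst hd <;> simp

lemma pvVal_digitsChars (n : Nat) : pvVal (pvDigitsChars n) = n := by
  induction n using Nat.strong_induction_on with
  | _ n ih =>
    rcases Nat.eq_zero_or_pos n with h0 | hpos
    · subst h0; rfl
    · have hd : Nat.digits 2 n = n % 2 :: Nat.digits 2 (n / 2) := Nat.digits_def' one_lt_two hpos
      have hn2 : n / 2 < n := Nat.div_lt_self hpos one_lt_two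
      have : pvDigitsChars n = pvDigitsChars (n / 2) ++ [if n % 2 = 1 then '1' else '0'] := by
        simp [pvDigitsChars, hd]
      rw [pvVal, this, List.foldl_append]
      have hv := ih (n / 2) hn2
      rw [pvVal] at hv; rw [hv]
      have h2 : n % 2 = 0 ∨ n % 2 = 1 := Nat.mod_two_eq_zero_or_one n
      rcases h2 with h2 | h2 <;> simp [List.foldl_cons, pvBitNat, h2] <;> omega

lemma pvVal_replicate_append (k : Nat) (t : List Char) :
    pvVal (List.replicate k '0' ++ t) = pvVal t := by
  induction k with
  | zero => simp
  | succ m ih => simpa [List.replicate_succ, pvVal, pvBitNat] using ih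

lemma pvBinVal?_word (k n : Nat) (hne : k + (pvDigitsChars n).length ≠ 0) :
    pvBinVal? (List.replicate k '0' ++ pvDigitsChars n) = some n := by
  have hbits : ∀ c ∈ List.replicate k '0' ++ pvDigitsChars n, c = '0' ∨ c = '1' := by
    intro c hc
    rcases List.mem_append.mp hc with h | h
    · left; exact List.eq_of_mem_replicate h
    · exact pvDigitsChars_bits n c h
  have hlist_ne : List.replicate k '0' ++ pvDigitsChars n ≠ [] := by
    intro hnil
    apply hne
    have := congrArg List.length hnil
    simp only [List.length_append, List.length_replicate, List.length_nil] at this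
    omega
  rw [pvBinVal?, if_neg (by simp [List.isEmpty_iff, hlist_ne]),
     pvBinStep_fold _ hbits 0]
  have : (List.replicate k '0' ++ pvDigitsChars n).foldl (fun a c => 2 * a + pvBitNat c) 0 = n := by
    have := pvVal_replicate_append k (pvDigitsChars n)
    rw [pvVal] at this; rw [this]
    have := pvVal_digitsChars n; rwa [pvVal] at this
  rw [this]

lemma length_pvDigitsChars (n : Nat) : (pvDigitsChars n).length = (Nat.digits 2 n).length := by
  simp [pvDigitsChars]

lemma pvDigitsChars_len_le {n k : Nat} (h : n < 2 ^ k) : (pvDigitsChars n).length ≤ k := by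
  rw [length_pvDigitsChars]
  rcases Nat.eq_zero_or_pos n with h0 | hpos
  · subst h0; simp
  · by_contra hgt
    push_neg at hgt
    have h1 : 2 ^ (Nat.digits 2 n).length ≤ 2 * n :=
      Nat.base_pow_length_digits_le 2 n one_lt_two (Nat.pos_iff_ne_zero.mp hpos)
    have h2 : 2 ^ (k + 1) ≤ 2 ^ (Nat.digits 2 n).length := Nat.pow_le_pow_right (by norm_num) hgt
    have : 2 ^ (k + 1) ≤ 2 * n := le_trans h2 h1
    rw [pow_succ] at this
    omega

lemma pvDigitsChars_shift (m d : Nat) (hm : m ≠ 0) :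
    pvDigitsChars (m * 2 ^ d) = pvDigitsChars m ++ List.replicate d '0' := by
  induction d generalizing m with
  | zero => simp
  | succ e ih =>
    have hme : m * 2 ≠ 0 := by omega
    have h1 : m * 2 ^ (e + 1) = (m * 2) * 2 ^ e := by ring
    have h2 : pvDigitsChars (m * 2) = pvDigitsChars m ++ ['0'] := by
      have hpos : 0 < m * 2 := by omega
      have hd : Nat.digits 2 (m * 2) = 0 :: Nat.digits 2 m := by
        rw [Nat.digits_def' one_lt_two hpos]
        have h5 : m * 2 % 2 = 0 := by omega
        have h6 : m * 2 / 2 = m := by omega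
        rw [h5, h6]
      simp [pvDigitsChars, hd]
    rw [h1, ih (m * 2) hme, h2, List.append_assoc]
    simp [List.replicate_succ]

lemma pvPadLeft_eq (res : List Char) (target : Nat) :
    pvPadLeft res target = List.replicate (target - res.length) '0' ++ res := by
  fun_induction pvPadLeft res target with
  | case1 res h ih =>
    rw [ih]
    have hk : target - res.length = (target - ('0' :: res).length) + 1 := by simp; omega
    rw [hk, List.replicate_succ']
    simp
  | case2 res h =>
    have : target - res.length = 0 := by omega
    simp [this]

lemma pvPadRight_eq (res : List Char) (target : Int) :
    pvPadRight res target = res ++ List.replicate (target - res.length).toNat '0' := by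
  fun_induction pvPadRight res target with
  | case1 res h ih =>
    rw [ih]
    have hk : (target - (res.length : Int)).toNat =
        (target - ((res ++ ['0']).length : Int)).toNat + 1 := by simp; omega
    rw [hk, List.replicate_succ, List.append_assoc]
    rfl
  | case2 res h =>
    have : (target - (res.length : Int)).toNat = 0 := by omega
    simp [this]

-- the word of width p for counter value code, as A stores it
def pvWordChars (p : Nat) (code : Nat) : List Char :=
  List.replicate (p - (pvDigitsChars code).length) '0' ++ pvDigitsChars code

lemma pvWordChars_length {p code : Nat} (h : code < 2 ^ p) : (pvWordChars p code).length = p := by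
  have := pvDigitsChars_len_le h
  simp [pvWordChars]; omega

lemma add_bit_parsed (w : List Char) (code : Nat) (hp : pvBinVal? w = some code) :
    add_bit (String.ofList w) =
      if (pvBinChars (code + 1)).length > w.length then none
      else some (String.ofList (pvPadLeft (pvBinChars (code + 1)) w.length)) := by
  simp only [add_bit, String.toList_ofList, hp]

-- A's step: from the word for (p, c) with c + 1 < 2^p, generate_new_word produces
-- the word for (L, (c+1)·2^(L-p))
lemma pvStepA (p L : Int) (c : Nat) (hp : 1 ≤ p) (hpL : p ≤ L)
    (hc : c + 1 < 2 ^ p.toNat) :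
    generate_new_word L (some (String.ofList (pvWordChars p.toNat c))) =
      some (String.ofList (pvWordChars L.toNat ((c + 1) * 2 ^ (L - p).toNat))) := by
  have hcode : c < 2 ^ p.toNat := by omega
  have hdlen : (pvDigitsChars c).length ≤ p.toNat := pvDigitsChars_len_le hcode
  have hwlen : (pvWordChars p.toNat c).length = p.toNat := pvWordChars_length hcode
  have hne : p.toNat - (pvDigitsChars c).length + (pvDigitsChars c).length ≠ 0 := by omega
  have hparse : pvBinVal? (pvWordChars p.toNat c) = some c := by
    rw [pvWordChars]; exact pvBinVal?_word _ _ hne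
  have hres : pvBinChars (c + 1) = pvDigitsChars (c + 1) := by
    rw [pvBinChars, if_neg (by omega)]
  have hab := add_bit_parsed (pvWordChars p.toNat c) c hparse
  rw [hwlen, hres] at hab
  have hrlen : (pvDigitsChars (c + 1)).length ≤ p.toNat := pvDigitsChars_len_le hc
  have hLp : L.toNat = p.toNat + (L - p).toNat := by omega
  have hshift : pvDigitsChars ((c + 1) * 2 ^ (L - p).toNat) =
      pvDigitsChars (c + 1) ++ List.replicate (L - p).toNat '0' :=
    pvDigitsChars_shift (c + 1) (L - p).toNat (by omega)
  have hshiftlen : (pvDigitsChars ((c + 1) * 2 ^ (L - p).toNat)).length =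
      (pvDigitsChars (c + 1)).length + (L - p).toNat := by
    rw [hshift]; simp
  have hA : add_bit (String.ofList (pvWordChars p.toNat c)) =
      some (String.ofList (List.replicate (p.toNat - (pvDigitsChars (c + 1)).length) '0' ++
        pvDigitsChars (c + 1))) := by
    rw [hab, if_neg (by omega), pvPadLeft_eq]
  rw [generate_new_word, hA, Option.map_some]
  congr 1
  rw [String.toList_ofList, pvPadRight_eq]
  have hlen2 : ((List.replicate (p.toNat - (pvDigitsChars (c + 1)).length) '0' ++
      pvDigitsChars (c + 1)).length : Int) = (p.toNat : Int) := by
    simp; omega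
  rw [hlen2]
  have hcount : (L - (p.toNat : Int)).toNat = (L - p).toNat := by omega
  rw [hcount, pvWordChars, hshiftlen, hshift]
  have heq : L.toNat - ((pvDigitsChars (c + 1)).length + (L - p).toNat) =
      p.toNat - (pvDigitsChars (c + 1)).length := by omega
  rw [heq, List.append_assoc]

-- ---- B-side characterisations ----

-- cast of B's closed-form code to Int
lemma pvCodeOf_cast (pref : List Int) (L : Int) :
    ((pvCodeOf pref L : Nat) : Int) = (pref.map (fun x => (2 : Int) ^ ((L - x).toNat))).sum := by
  induction pref with
  | nil => simp [pvCodeOf]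
  | cons a t ih =>
    simp only [pvCodeOf, List.map_cons, List.sum_cons, Nat.cast_add, Nat.one_shiftLeft] at ih ⊢
    rw [ih]
    push_cast
    ring

-- rescaling the closed-form sum from width p to width L ≥ p
lemma pvCodeOf_scale (pref : List Int) (p L : Int)
    (hall : ∀ l ∈ pref, l ≤ p) (hpL : p ≤ L) :
    pvCodeOf pref L = pvCodeOf pref p * 2 ^ (L - p).toNat := by
  induction pref with
  | nil => simp [pvCodeOf]
  | cons a t ih =>
    have ha : a ≤ p := hall a (by simp)
    have ht : ∀ l ∈ t, l ≤ p := fun l hl => hall l (by simp [hl])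
    have iht := ih ht
    simp only [pvCodeOf, List.map_cons, List.sum_cons, Nat.one_shiftLeft] at iht ⊢
    rw [iht, add_mul, ← pow_add]
    congr 2
    omega

-- same rescaling, stated over Int for the Kraft argument
lemma pvCodeOf_scale_int (pref : List Int) (p M : Int)
    (hall : ∀ l ∈ pref, l ≤ p) (hpM : p ≤ M) :
    ((pvCodeOf pref p : Nat) : Int) * 2 ^ (M - p).toNat
      = (pref.map (fun x => (2 : Int) ^ ((M - x).toNat))).sum := by
  rw [← pvCodeOf_cast pref M, pvCodeOf_scale pref p M hall hpM]
  push_cast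
  ring

-- code recurrence: appending p to the prefix rescales the closed-form sum
lemma pvCodeOf_append (pref : List Int) (p L : Int)
    (hall : ∀ l ∈ pref, l ≤ p) (hpL : p ≤ L) :
    pvCodeOf (pref ++ [p]) L = (pvCodeOf pref p + 1) * 2 ^ (L - p).toNat := by
  have h1 : pvCodeOf (pref ++ [p]) L = pvCodeOf pref L + pvCodeOf [p] L := by
    simp [pvCodeOf]
  have h2 : pvCodeOf [p] L = 2 ^ (L - p).toNat := by
    simp [pvCodeOf, Nat.one_shiftLeft]
  rw [h1, h2, pvCodeOf_scale pref p L hall hpL]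
  ring

-- reversing a map over a range flips the index
lemma pvRangeRev (n : Nat) (g : Nat → Char) :
    ((List.range n).map g).reverse = (List.range n).map (fun k => g (n - 1 - k)) := by
  apply List.ext_getElem
  · simp
  · intro k h1 h2
    simp only [List.getElem_reverse, List.getElem_map, List.getElem_range, List.length_map,
      List.length_range]

-- bits of c read from the LSB up
lemma pvRevBits (n : Nat) : ∀ c : Nat, c < 2 ^ n →
    (Nat.digits 2 c).map (fun d => if d = 1 then '1' else '0') ++
        List.replicate (n - (Nat.digits 2 c).length) '0' =
      (List.range n).map (fun j => if (c >>> j) &&& 1 ≠ 0 then '1' else '0') := by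
  induction n with
  | zero => intro c hc; interval_cases c; simp
  | succ n ih =>
    intro c hc
    have hrange : List.range (n + 1) = 0 :: (List.range n).map Nat.succ :=
      List.range_succ_eq_map
    have hhead : (if (c >>> 0) &&& 1 ≠ 0 then '1' else '0') = (if c % 2 = 1 then '1' else '0') := by
      simp [Nat.and_one_is_mod]
    have htail : ((List.range n).map Nat.succ).map
          (fun j => if (c >>> j) &&& 1 ≠ 0 then '1' else '0') =
        (List.range n).map (fun j => if ((c / 2) >>> j) &&& 1 ≠ 0 then '1' else '0') := by
      rw [List.map_map]
      apply List.map_congr_left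
      intro j _
      have hs : c >>> (j + 1) = (c / 2) >>> j := by
        simp [Nat.shiftRight_succ_inside]
      simp [Function.comp, Nat.succ_eq_add_one, hs]
    have hps : 2 ^ (n + 1) = 2 ^ n * 2 := pow_succ 2 n
    have hc2 : c / 2 < 2 ^ n := Nat.div_lt_of_lt_mul (by omega)
    have ihc := ih (c / 2) hc2
    rcases Nat.eq_zero_or_pos c with h0 | hpos
    · subst h0
      simp only [Nat.digits_zero, List.map_nil, List.length_nil, Nat.sub_zero, List.nil_append]
      rw [hrange]
      simp only [List.map_cons, hhead]
      rw [htail]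
      simp only [Nat.zero_div] at ihc ⊢
      have h00 : (Nat.digits 2 0).map (fun d => if d = 1 then '1' else '0') ++
          List.replicate (n - (Nat.digits 2 0).length) '0' = List.replicate n '0' := by simp
      rw [h00] at ihc
      rw [← ihc]
      simp [List.replicate_succ]
    · have hd : Nat.digits 2 c = c % 2 :: Nat.digits 2 (c / 2) := Nat.digits_def' one_lt_two hpos
      rw [hrange, List.map_cons, hhead, htail, ← ihc, hd]
      simp only [List.map_cons, List.length_cons, List.cons_append]
      have hcnt : n + 1 - ((Nat.digits 2 (c / 2)).length + 1) =
          n - (Nat.digits 2 (c / 2)).length := by omega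
      rw [hcnt]

-- MSB-first bits over a Nat range equal the zero-padded digit string
lemma pvBitsRange (n : Nat) (c : Nat) (hc : c < 2 ^ n) :
    (List.range n).map (fun k => if (c >>> (n - 1 - k)) &&& 1 ≠ 0 then '1' else '0') =
      List.replicate (n - (pvDigitsChars c).length) '0' ++ pvDigitsChars c := by
  rw [← pvRangeRev n (fun j => if (c >>> j) &&& 1 ≠ 0 then '1' else '0'), ← pvRevBits n c hc]
  rw [List.reverse_append, List.reverse_replicate]
  simp [pvDigitsChars]

-- B's word equals A's padded word whenever the code fits in the width
lemma pvWordOf_eq (L : Int) (c : Nat) (hL : 0 ≤ L) (hc : c < 2 ^ L.toNat) :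
    pvWordOf c L = String.ofList (pvWordChars L.toNat c) := by
  rw [pvWordOf, pvWordChars]
  congr 1
  have hlist : (PySem.List.pyRange 0 L 1).map
        (fun k => if (c >>> (L - 1 - k).toNat) &&& 1 ≠ 0 then '1' else '0') =
      (List.range L.toNat).map (fun k => if (c >>> (L.toNat - 1 - k)) &&& 1 ≠ 0 then '1' else '0') := by
    rw [PySem.List.pyRange_one, List.map_map]
    have hL0 : (L - 0).toNat = L.toNat := by omega
    rw [hL0]
    apply List.map_congr_left
    intro k hk
    simp only [List.mem_range] at hk
    simp only [Function.comp_apply]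
    have he : (L - 1 - (0 + (k : Int))).toNat = L.toNat - 1 - k := by omega
    rw [he]
  rw [hlist, pvBitsRange L.toNat c hc]

-- the all-zero first word: B's generator at code 0, over any width
lemma pvWordOf_zero (L : Int) : pvWordOf 0 L = String.ofList (List.replicate L.toNat '0') := by
  rw [pvWordOf]
  congr 1
  have hlen : ((PySem.List.pyRange 0 L 1).map (fun k =>
      if ((0 : Nat) >>> (L - 1 - k).toNat) &&& 1 ≠ 0 then '1' else '0')).length = L.toNat := by
    rw [List.length_map, PySem.List.length_pyRange_one]
    omega
  rw [List.eq_replicate_iff]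
  refine ⟨hlen, ?_⟩
  intro b hb
  simp only [List.mem_map] at hb
  obtain ⟨k, _, hk⟩ := hb
  simp [Nat.zero_shiftRight] at hk
  first
  | exact hk
  | exact hk.symm

-- B's closed form, written as the recursion the A-loop follows
def pvTail : List Int → List Int → List String
  | _, [] => []
  | pref, L :: rest => pvWordOf (pvCodeOf pref L) L :: pvTail (pref ++ [L]) rest

-- the last element of a ≤-sorted list bounds every element
lemma pvLe_last : ∀ (S : List Int), S.Pairwise (· ≤ ·) → ∀ x ∈ S, x ≤ S.getLastD 0 := by
  intro S
  induction S with
  | nil => intro _ x hx; simp at hx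
  | cons a t ih =>
    intro hp x hx
    have hat := (List.pairwise_cons.mp hp).1
    have htp := (List.pairwise_cons.mp hp).2
    cases t with
    | nil => simp at hx; simp [hx]
    | cons b t' =>
      rcases List.mem_cons.mp hx with h | h
      · subst h
        have hbm : b ∈ b :: t' := by simp
        have hxb := hat b hbm
        have hbl := ih htp b hbm
        simp only [List.getLastD_cons] at hbl ⊢
        omega
      · have hxl := ih htp x h
        simp only [List.getLastD_cons] at hxl ⊢
        omega

-- every power-sum term is nonnegative
lemma pvSum_nonneg (l : List Int) (M : Int) :
    0 ≤ (l.map (fun x => (2 : Int) ^ ((M - x).toNat))).sum := by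
  apply List.sum_nonneg
  intro x hx
  simp only [List.mem_map] at hx
  obtain ⟨y, _, hy⟩ := hx
  subst hy
  positivity

-- Kraft bound: inside Pre_ (second disjunct), at every non-final position the counter has room
lemma pvKraft_mid (S pref rest : List Int) (p : Int)
    (hpair : S.Pairwise (· ≤ ·)) (h1 : ∀ x ∈ S, 1 ≤ x)
    (hK : (S.dropLast.map (fun x => (2 : Int) ^ (S.getLastD 0 - x).toNat)).sum
        < (2 : Int) ^ ((S.getLastD 0).toNat))
    (hS : S = pref ++ p :: rest) (hne : rest ≠ []) :
    pvCodeOf pref p + 1 < 2 ^ p.toNat := by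
  have hpmem : p ∈ S := by rw [hS]; simp
  have hp1 : 1 ≤ p := h1 p hpmem
  have hpM : p ≤ S.getLastD 0 := pvLe_last S hpair p hpmem
  set M := S.getLastD 0 with hM
  have hdrop : S.dropLast = pref ++ p :: rest.dropLast := by
    rw [hS, List.dropLast_append_of_ne_nil (by simp), List.dropLast_cons_of_ne_nil hne]
  have hallpref : ∀ l ∈ pref, l ≤ p := by
    rw [hS] at hpair
    have hpa := (List.pairwise_append.mp hpair).2.2
    intro l hl
    exact hpa l hl p (by simp)
  have hsum : (pref.map (fun x => (2 : Int) ^ ((M - x).toNat))).sum + 2 ^ ((M - p).toNat)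
      ≤ (S.dropLast.map (fun x => (2 : Int) ^ ((M - x).toNat))).sum := by
    rw [hdrop]
    simp only [List.map_append, List.sum_append, List.map_cons, List.sum_cons]
    have hnn := pvSum_nonneg rest.dropLast M
    omega
  have hscale := pvCodeOf_scale_int pref p M hallpref hpM
  -- ((c+1) : Int) * 2^(M-p) < 2^M = 2^(M-p) * 2^p
  have hMsplit : (2 : Int) ^ (M.toNat) = 2 ^ ((M - p).toNat) * 2 ^ (p.toNat) := by
    rw [← pow_add]
    congr 1
    omega
  have hlt : (((pvCodeOf pref p : Nat) : Int) + 1) * 2 ^ ((M - p).toNat)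
      < 2 ^ ((M - p).toNat) * 2 ^ (p.toNat) := by
    rw [add_mul, one_mul, hscale, ← hMsplit]
    omega
  have hpos : (0 : Int) < 2 ^ ((M - p).toNat) := by positivity
  have hfin : ((pvCodeOf pref p : Nat) : Int) + 1 < 2 ^ (p.toNat) := by
    rw [mul_comm (2 ^ ((M - p).toNat)) (2 ^ (p.toNat))] at hlt
    exact lt_of_mul_lt_mul_right (by simpa [mul_comm] using hlt) (le_of_lt hpos)
  exact_mod_cast hfin

-- B's loop from any nonempty prefix: inside Pre_ the guard never fires and the remaining
-- closed-form words are produced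
lemma pvLoopB_tail (S : List Int) (hpair : S.Pairwise (· ≤ ·)) (h1 : ∀ x ∈ S, 1 ≤ x)
    (hK : (S.dropLast.map (fun x => (2 : Int) ^ (S.getLastD 0 - x).toNat)).sum
        < (2 : Int) ^ ((S.getLastD 0).toNat)) :
    ∀ (rest pref : List Int) (words : List String), S = pref ++ rest → pref ≠ [] →
      pvLoopB S (PySem.List.enumerate rest (pref.length : Int)) words
        = some (words ++ pvTail pref rest) := by
  intro rest
  induction rest with
  | nil =>
    intro pref words _ _
    simp [PySem.List.enumerate, pvLoopB, pvTail]
  | cons L rest' ih =>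
    intro pref words hS hne
    rcases List.eq_nil_or_concat pref with h0 | ⟨pref', p, hp⟩
    · exact absurd h0 hne
    · have hS' : S = pref' ++ p :: (L :: rest') := by rw [hS, hp]; simp
      have hpmem : p ∈ S := by rw [hS']; simp
      have hLmem : L ∈ S := by rw [hS']; simp
      have hp1 : 1 ≤ p := h1 p hpmem
      have hL1 : 1 ≤ L := h1 L hLmem
      have hpL : p ≤ L := by
        rw [hS'] at hpair
        have hmid := (List.pairwise_append.mp hpair).2.1
        exact (List.pairwise_cons.mp hmid).1 L (by simp)
      have hallpref' : ∀ l ∈ pref', l ≤ p := by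
        rw [hS'] at hpair
        have hpa := (List.pairwise_append.mp hpair).2.2
        intro l hl
        exact hpa l hl p (by simp)
      have hcmid : pvCodeOf pref' p + 1 < 2 ^ p.toNat :=
        pvKraft_mid S pref' (L :: rest') p hpair h1 hK hS' (by simp)
      have hcodeEq : pvCodeOf pref L = (pvCodeOf pref' p + 1) * 2 ^ (L - p).toNat := by
        rw [hp, List.concat_eq_append]; exact pvCodeOf_append pref' p L hallpref' hpL
      have hbound : pvCodeOf pref L < 2 ^ L.toNat := by
        rw [hcodeEq]
        have hLp : L.toNat = p.toNat + (L - p).toNat := by omega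
        rw [hLp, pow_add]
        exact Nat.mul_lt_mul_of_lt_of_le hcmid (le_refl _) (by positivity)
      have htake : S.take ((pref.length : Int)).toNat = pref := by
        rw [Int.toNat_natCast, hS, List.take_left]
      have hlen0 : pref.length ≠ 0 := by
        intro hcon
        exact hne (List.eq_nil_of_length_eq_zero hcon)
      rw [PySem.List.enumerate_cons]
      simp only [pvLoopB, htake]
      rw [if_pos (by exact_mod_cast hlen0), if_neg (by omega), if_neg (by omega)]
      have hcast : ((pref.length : Int)) + 1 = (((pref ++ [L]).length : Nat) : Int) := by simp
      rw [hcast, ih (pref ++ [L]) (words ++ [pvWordOf (pvCodeOf pref L) L])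
        (by rw [hS]; simp) (by simp)]
      rw [pvTail]
      simp

-- main invariant: A's loop from an aligned state produces B's remaining closed-form words
lemma pvLoopA_tail (S : List Int) (hpair : S.Pairwise (· ≤ ·)) (h1 : ∀ x ∈ S, 1 ≤ x)
    (hK : (S.dropLast.map (fun x => (2 : Int) ^ (S.getLastD 0 - x).toNat)).sum
        < (2 : Int) ^ ((S.getLastD 0).toNat)) :
    ∀ (rest pref : List Int) (p : Int) (acc : List String), S = pref ++ p :: rest →
      pvLoopA rest (some (String.ofList (pvWordChars p.toNat (pvCodeOf pref p)))) acc
        = some (acc ++ pvTail (pref ++ [p]) rest) := by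
  intro rest
  induction rest with
  | nil => intro pref p acc _; simp [pvLoopA, pvTail]
  | cons L rest' ih =>
    intro pref p acc hS
    have hpmem : p ∈ S := by rw [hS]; simp
    have hp1 : 1 ≤ p := h1 p hpmem
    have hpL : p ≤ L := by
      rw [hS] at hpair
      have hmid := ((List.pairwise_append.mp hpair).2.1)
      exact (List.pairwise_cons.mp hmid).1 L (by simp)
    have hallpref : ∀ l ∈ pref, l ≤ p := by
      rw [hS] at hpair
      have hpa := (List.pairwise_append.mp hpair).2.2
      intro l hl
      exact hpa l hl p (by simp)
    have hc1 : pvCodeOf pref p + 1 < 2 ^ p.toNat :=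
      pvKraft_mid S pref (L :: rest') p hpair h1 hK hS (by simp)
    have hstep := pvStepA p L (pvCodeOf pref p) hp1 hpL hc1
    rw [pvLoopA, hstep]
    have hcode : (pvCodeOf pref p + 1) * 2 ^ (L - p).toNat = pvCodeOf (pref ++ [p]) L :=
      (pvCodeOf_append pref p L hallpref hpL).symm
    rw [hcode]
    have hbound : pvCodeOf (pref ++ [p]) L < 2 ^ L.toNat := by
      rw [← hcode]
      have hLp : L.toNat = p.toNat + (L - p).toNat := by omega
      rw [hLp, pow_add]
      have h2 : 0 < 2 ^ (L - p).toNat := by positivity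
      exact Nat.mul_lt_mul_of_lt_of_le hc1 (le_refl _) h2
    have hS' : S = (pref ++ [p]) ++ L :: rest' := by rw [hS]; simp
    show pvLoopA rest' (some (String.ofList (pvWordChars L.toNat (pvCodeOf (pref ++ [p]) L))))
        (acc ++ [String.ofList (pvWordChars L.toNat (pvCodeOf (pref ++ [p]) L))])
      = some (acc ++ pvTail (pref ++ [p]) (L :: rest'))
    rw [ih (pref ++ [p]) L (acc ++ [String.ofList (pvWordChars L.toNat (pvCodeOf (pref ++ [p]) L))]) hS']
    rw [pvTail]
    rw [pvWordOf_eq L (pvCodeOf (pref ++ [p]) L) (by omega) hbound]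
    simp

-- from the start: the two functions agree on every input satisfying Pre_
lemma pv_main (wl : List Int) (hpre : Pre_generate_code_words wl) :
    generate_code_words wl = generate_code_words_alt wl := by
  rw [generate_code_words, generate_code_words_alt]
  unfold Pre_generate_code_words at hpre
  have hpair : (PySem.List.sorted wl (fun x => x) false).Pairwise (fun a b => a ≤ b) :=
    PySem.List.sorted_pairwise wl (fun x => x)
  have hlen : (PySem.List.sorted wl (fun x => x) false).length = wl.length :=
    PySem.List.length_sorted wl (fun x => x) false
  cases hsort : PySem.List.sorted wl (fun x => x) false with
  | nil => rfl
  | cons L1 rest =>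
    rw [hsort] at hpair hlen hpre
    have hw0 : pvPadRight [] L1 = List.replicate L1.toNat '0' := by
      rw [pvPadRight_eq]; simp
    have hstepA : pvLoopA (L1 :: rest) none [] =
        pvLoopA rest (some (String.ofList (List.replicate L1.toNat '0')))
          [String.ofList (List.replicate L1.toNat '0')] := by
      rw [pvLoopA, generate_new_word, hw0]
      simp
    have hc0 : pvCodeOf [] L1 = 0 := by simp [pvCodeOf]
    have hstepB : pvLoopB (L1 :: rest) (PySem.List.enumerate (L1 :: rest) 0) [] =
        pvLoopB (L1 :: rest) (PySem.List.enumerate rest 1) [pvWordOf (pvCodeOf [] L1) L1] := by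
      rw [PySem.List.enumerate_cons]
      simp [pvLoopB]
    cases rest with
    | nil =>
      rw [hstepA, hstepB]
      simp only [pvLoopA, pvLoopB, PySem.List.enumerate, Option.getD_some]
      rw [hc0, pvWordOf_zero]
    | cons L2 rest2 =>
      rcases hpre with hshort | ⟨h1wl, hK⟩
      · simp at hlen
        omega
      · have h1 : ∀ x ∈ (L1 :: L2 :: rest2), 1 ≤ x := by
          intro x hx
          apply h1wl
          have hm := (PySem.List.mem_sorted wl (fun y => y) false x).mp
          rw [hsort] at hm
          exact hm hx
        have hL1 : 1 ≤ L1 := h1 L1 (by simp)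
        have hword0 : List.replicate L1.toNat '0' = pvWordChars L1.toNat (pvCodeOf [] L1) := by
          simp [pvWordChars, pvCodeOf, pvDigitsChars]
        rw [hstepA, hword0]
        have hinv := pvLoopA_tail (L1 :: L2 :: rest2) hpair h1 hK (L2 :: rest2) [] L1
          [String.ofList (pvWordChars L1.toNat (pvCodeOf [] L1))] (by simp)
        rw [hinv]
        rw [hstepB]
        have hinvB := pvLoopB_tail (L1 :: L2 :: rest2) hpair h1 hK (L2 :: rest2) [L1]
          [pvWordOf (pvCodeOf [] L1) L1] (by simp) (by simp)
        have hone : (1 : Int) = (([L1] : List Int).length : Int) := by simp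
        rw [hone, hinvB]
        have hhead : pvWordOf (pvCodeOf [] L1) L1 =
            String.ofList (pvWordChars L1.toNat (pvCodeOf [] L1)) :=
          pvWordOf_eq L1 (pvCodeOf [] L1) (by omega) (by rw [hc0]; positivity)
        rw [hhead]
        simp

-- ===== VERDICT (by name: the statement is the Claim_ definition above) =====
theorem generate_code_words_spec : Claim_equal_generate_code_words := by
  intro word_lengths _ hpre
  unfold Spec_generate_code_words
  exact pv_main word_lengths hpre
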